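-- pv_equiv track=rewrite | github.com/icub3d/everybody-codes | ec_2025/visualize_quest15_p3.py | generate_line_segments
-- ===== SOURCE A (Python) =====
-- def generate_line_segments(instructions):
--     """Generates line segments based on the logic from Map::from_input in the Rust code,
--     and returns the walls, the true start point, and the true end point.
--     """
--     delta = (0, -1)
--     next_pos = (0, 0)
--
--     walls = []
--
--     true_start_point = next_pos
--
--     for direction, distance in instructions:
--         if direction == 'L':
--             delta = (delta[1], -delta[0])
--         elif direction == 'R':
--             delta = (-delta[1], delta[0])
--
--         next_pos = (next_pos[0] + delta[0], next_pos[1] + delta[1])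
--         begin_wall = next_pos
--
--         next_pos = (next_pos[0] + delta[0] * (distance - 2), next_pos[1] + delta[1] * (distance - 2))
--         end_wall = next_pos
--
--         walls.append((begin_wall, end_wall))
--
--         next_pos = (next_pos[0] + delta[0], next_pos[1] + delta[1])
--
--     true_end_point = next_pos
--
--     return walls, true_start_point, true_end_point
-- ===== SOURCE B (Python) =====
-- def generate_line_segments(instructions):
--     # Pass 1: resolve the heading in effect for each instruction.
--     deltas = []
--     d = (0, -1)
--     for direction, _ in instructions:
--         if direction == 'L':
--             d = (d[1], -d[0])
--         elif direction == 'R':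
--             d = (-d[1], d[0])
--         deltas.append(d)
--     # Pass 2: prefix sum of per-instruction displacements gives the start position
--     # before each instruction (and the final position at the end).
--     starts = [(0, 0)]
--     for (dx, dy), (_, dist) in zip(deltas, instructions):
--         x, y = starts[-1]
--         starts.append((x + dx * dist, y + dy * dist))
--     # Build each wall from the precomputed heading and start position.
--     walls = [((x + dx, y + dy), (x + dx * (dist - 1), y + dy * (dist - 1)))
--              for (dx, dy), (x, y), (_, dist) in zip(deltas, starts, instructions)]
--     return walls, (0, 0), starts[-1]
-- ===== Notes on version B (the rewrite author's own statement) =====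
-- stated objective: alternative
-- what changed: Replaced the single mutating turtle walk by two prefix passes (fold rotations into a per-instruction heading list, then a prefix sum of heading*distance giving each start position) with the walls built by a comprehension over the zipped arrays.
import Mathlib
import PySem

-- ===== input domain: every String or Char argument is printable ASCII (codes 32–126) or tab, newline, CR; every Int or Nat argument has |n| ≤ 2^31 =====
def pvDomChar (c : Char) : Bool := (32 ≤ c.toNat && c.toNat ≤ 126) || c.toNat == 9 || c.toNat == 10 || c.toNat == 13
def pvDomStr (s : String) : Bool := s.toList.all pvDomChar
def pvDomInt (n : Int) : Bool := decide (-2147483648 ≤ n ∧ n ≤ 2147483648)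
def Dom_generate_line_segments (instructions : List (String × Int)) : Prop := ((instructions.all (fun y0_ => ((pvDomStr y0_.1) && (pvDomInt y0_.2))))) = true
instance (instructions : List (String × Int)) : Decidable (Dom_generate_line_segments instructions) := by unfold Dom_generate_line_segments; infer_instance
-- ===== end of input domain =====

-- B replaces the single mutating turtle walk by two prefix passes (headings, then
-- prefix-sum start positions) and builds each wall by a comprehension (objective: alternative).

-- ===== PORT A =====
def glsStep (st : (Int × Int) × (Int × Int) × List ((Int × Int) × (Int × Int)))
    (ins : String × Int) : (Int × Int) × (Int × Int) × List ((Int × Int) × (Int × Int)) :=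
  let delta := st.1
  let next_pos := st.2.1
  let walls := st.2.2
  let delta := if ins.1 = "L" then (delta.2, -delta.1)
    else if ins.1 = "R" then (-delta.2, delta.1) else delta
  let next_pos := (next_pos.1 + delta.1, next_pos.2 + delta.2)
  let begin_wall := next_pos
  let next_pos := (next_pos.1 + delta.1 * (ins.2 - 2), next_pos.2 + delta.2 * (ins.2 - 2))
  let end_wall := next_pos
  let walls := walls ++ [(begin_wall, end_wall)]
  let next_pos := (next_pos.1 + delta.1, next_pos.2 + delta.2)
  (delta, next_pos, walls)

def generate_line_segments (instructions : List (String × Int)) :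
    (List ((Int × Int) × (Int × Int))) × (Int × Int) × (Int × Int) :=
  let st := instructions.foldl glsStep ((0, -1), (0, 0), [])
  (st.2.2, (0, 0), st.2.1)

-- ===== PORT B =====
def rotB (d : Int × Int) (dir : String) : Int × Int :=
  if dir = "L" then (d.2, -d.1) else if dir = "R" then (-d.2, d.1) else d

def generate_line_segments_alt (instructions : List (String × Int)) :
    (List ((Int × Int) × (Int × Int))) × (Int × Int) × (Int × Int) :=
  let ds := (instructions.foldl
      (fun (acc : List (Int × Int) × (Int × Int)) ins =>
        let d := rotB acc.2 ins.1
        (acc.1 ++ [d], d)) ([], (0, -1))).1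
  let starts := (List.zip ds instructions).foldl
      (fun (acc : List (Int × Int) × (Int × Int)) p =>
        let q := (acc.2.1 + p.1.1 * p.2.2, acc.2.2 + p.1.2 * p.2.2)
        (acc.1 ++ [q], q)) ([((0 : Int), (0 : Int))], (0, 0))
  let walls := (List.zip ds (List.zip starts.1 instructions)).map
      (fun t => ((t.2.1.1 + t.1.1, t.2.1.2 + t.1.2),
                 (t.2.1.1 + t.1.1 * (t.2.2.2 - 1), t.2.1.2 + t.1.2 * (t.2.2.2 - 1))))
  (walls, (0, 0), starts.2)

-- ===== PRECONDITION & SPEC =====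
def Spec_generate_line_segments (instructions : List (String × Int)) (out : (List ((Int × Int) × (Int × Int))) × (Int × Int) × (Int × Int)) : Prop := out = generate_line_segments_alt instructions
instance (instructions : List (String × Int)) (out : (List ((Int × Int) × (Int × Int))) × (Int × Int) × (Int × Int)) : Decidable (Spec_generate_line_segments instructions out) := by unfold Spec_generate_line_segments; infer_instance

-- ===== CLAIM (what is proved, stated in full; the proofs are below) =====
def Claim_equal_generate_line_segments : Prop := ∀ (instructions : List (String × Int)), Dom_generate_line_segments instructions → Spec_generate_line_segments instructions (generate_line_segments instructions)

-- ===== LEMMAS AND PROOFS =====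

-- reference recursion: headings, walls and final position of the walk
def dlist (d : Int × Int) : List (String × Int) → List (Int × Int)
  | [] => []
  | i :: r => rotB d i.1 :: dlist (rotB d i.1) r

def Wrec (d p : Int × Int) : List (String × Int) →
    List ((Int × Int) × (Int × Int)) × (Int × Int)
  | [] => ([], p)
  | i :: r =>
    let d' := rotB d i.1
    let rest := Wrec d' (p.1 + d'.1 * i.2, p.2 + d'.2 * i.2) r
    (((p.1 + d'.1, p.2 + d'.2), (p.1 + d'.1 * (i.2 - 1), p.2 + d'.2 * (i.2 - 1))) :: rest.1,
     rest.2)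

lemma foldA (ins : List (String × Int)) : ∀ (d p : Int × Int)
    (w : List ((Int × Int) × (Int × Int))),
    ins.foldl glsStep (d, p, w)
      = (ins.foldl (fun d i => rotB d i.1) d, (Wrec d p ins).2, w ++ (Wrec d p ins).1) := by
  induction ins with
  | nil => intro d p w; simp [Wrec]
  | cons i r ih =>
    intro d p w
    have hstep : glsStep (d, p, w) i
        = (rotB d i.1,
           (p.1 + (rotB d i.1).1 * i.2, p.2 + (rotB d i.1).2 * i.2),
           w ++ [((p.1 + (rotB d i.1).1, p.2 + (rotB d i.1).2),
                  (p.1 + (rotB d i.1).1 * (i.2 - 1), p.2 + (rotB d i.1).2 * (i.2 - 1)))]) := by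
      simp only [glsStep, rotB]
      split_ifs <;> simp [Prod.ext_iff] <;> ring_nf <;> simp
    simp only [List.foldl_cons, hstep, ih, Wrec]
    simp

lemma foldDs (ins : List (String × Int)) : ∀ (acc : List (Int × Int)) (d : Int × Int),
    ins.foldl (fun (acc : List (Int × Int) × (Int × Int)) ins =>
        (acc.1 ++ [rotB acc.2 ins.1], rotB acc.2 ins.1)) (acc, d)
      = (acc ++ dlist d ins, ins.foldl (fun d i => rotB d i.1) d) := by
  induction ins with
  | nil => intro acc d; simp [dlist]
  | cons i r ih => intro acc d; simp [dlist, ih]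

def slist (p : Int × Int) : List ((Int × Int) × (String × Int)) → List (Int × Int)
  | [] => []
  | q :: r => (p.1 + q.1.1 * q.2.2, p.2 + q.1.2 * q.2.2)
      :: slist (p.1 + q.1.1 * q.2.2, p.2 + q.1.2 * q.2.2) r

def send (p : Int × Int) : List ((Int × Int) × (String × Int)) → Int × Int
  | [] => p
  | q :: r => send (p.1 + q.1.1 * q.2.2, p.2 + q.1.2 * q.2.2) r

lemma foldS (pairs : List ((Int × Int) × (String × Int))) :
    ∀ (acc : List (Int × Int)) (p : Int × Int),
    pairs.foldl (fun (acc : List (Int × Int) × (Int × Int)) q =>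
        (acc.1 ++ [(acc.2.1 + q.1.1 * q.2.2, acc.2.2 + q.1.2 * q.2.2)],
         (acc.2.1 + q.1.1 * q.2.2, acc.2.2 + q.1.2 * q.2.2))) (acc, p)
      = (acc ++ slist p pairs, send p pairs) := by
  induction pairs with
  | nil => intro acc p; simp [slist, send]
  | cons q r ih => intro acc p; simp [slist, send, ih]

lemma send_eq (ins : List (String × Int)) : ∀ (d p : Int × Int),
    send p (List.zip (dlist d ins) ins) = (Wrec d p ins).2 := by
  induction ins with
  | nil => intro d p; simp [dlist, send, Wrec]
  | cons i r ih => intro d p; simp [dlist, send, Wrec, ih]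

lemma walls_eq (ins : List (String × Int)) : ∀ (d p : Int × Int),
    (List.zip (dlist d ins) (List.zip (p :: slist p (List.zip (dlist d ins) ins)) ins)).map
      (fun t => ((t.2.1.1 + t.1.1, t.2.1.2 + t.1.2),
                 (t.2.1.1 + t.1.1 * (t.2.2.2 - 1), t.2.1.2 + t.1.2 * (t.2.2.2 - 1))))
      = (Wrec d p ins).1 := by
  induction ins with
  | nil => intro d p; simp [dlist, Wrec]
  | cons i r ih => intro d p; simp [dlist, slist, Wrec, ih]

-- ===== VERDICT (by name: the statement is the Claim_ definition above) =====
theorem generate_line_segments_spec : Claim_equal_generate_line_segments := by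
  intro ins _
  show generate_line_segments ins = generate_line_segments_alt ins
  simp only [generate_line_segments, generate_line_segments_alt, foldA, foldDs, foldS,
    List.nil_append, List.singleton_append, send_eq, walls_eq]
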